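-- pv_equiv track=rewrite | github.com/de1rik7/repository | zanatie_9/zanatie_9_v3_2.py | move_max_to_corner
-- ===== SOURCE A (Python) =====
-- def move_max_to_corner(matrix):
--     n = len(matrix)
--     m = len(matrix[0])
--
--     max_val = matrix[0][0]
--     max_i, max_j = 0, 0
--
--     for i in range(n):
--         for j in range(m):
--             if matrix[i][j] > max_val:
--                 max_val = matrix[i][j]
--                 max_i, max_j = i, j
--
--     result = [row[:] for row in matrix]
--
--     if max_i != 0:
--         result[0], result[max_i] = result[max_i], result[0]
--
--     if max_j != 0:
--         for i in range(n):
--             result[i][0], result[i][max_j] = result[i][max_j], result[i][0]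
--
--     return result, max_val
-- ===== SOURCE B (Python) =====
-- def move_max_to_corner(matrix):
--     n = len(matrix)
--     m = len(matrix[0])
--     max_val, ni, nj = max((matrix[i][j], -i, -j) for i in range(n) for j in range(m))
--     max_i, max_j = -ni, -nj
--     pr = lambda i: max_i if i == 0 else (0 if i == max_i else i)
--     pc = lambda j: max_j if j == 0 else (0 if j == max_j else j)
--     result = [[matrix[pr(i)][pc(j)] for j in range(m)] for i in range(n)]
--     return result, max_val
-- ===== Notes on version B (the rewrite author's own statement) =====
-- stated objective: simpler
-- what changed: A's tracked argmax scan followed by copying the matrix and mutating it with a row swap and an in-place column swap is replaced by taking the lexicographic max of (value,-i,-j) triples (tuple ordering does the tie-breaking) and rebuilding the output directly through row/column index permutations, with no copies or swaps at all.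
-- outside the precondition, e.g. on move_max_to_corner([[1, 2], [3, 4, 9]]): A returns ([[4, 3, 9], [2, 1]], 4), B returns ([[4, 3], [2, 1]], 4)
import Mathlib
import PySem

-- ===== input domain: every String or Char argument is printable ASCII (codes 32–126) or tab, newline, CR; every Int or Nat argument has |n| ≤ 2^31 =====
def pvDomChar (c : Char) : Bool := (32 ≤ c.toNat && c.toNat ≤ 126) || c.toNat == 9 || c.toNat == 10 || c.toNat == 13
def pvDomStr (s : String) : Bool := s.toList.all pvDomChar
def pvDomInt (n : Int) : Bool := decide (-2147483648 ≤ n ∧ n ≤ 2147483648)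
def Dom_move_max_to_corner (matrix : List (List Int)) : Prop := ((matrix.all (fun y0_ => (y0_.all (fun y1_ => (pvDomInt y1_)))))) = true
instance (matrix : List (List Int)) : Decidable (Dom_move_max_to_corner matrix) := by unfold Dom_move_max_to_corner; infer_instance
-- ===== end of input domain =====

-- B replaces A's tracked argmax scan plus copy-and-swap mutation by the lexicographic max of
-- (value,-i,-j) triples followed by a direct rebuild of the output through row/column index
-- permutations (no copies, no swaps); objective: simpler. Return values are what is compared.

-- ===== PORT A =====
def move_max_to_corner (matrix : List (List Int)) : List (List Int) × Int :=
  let n : Int := PySem.List.len matrix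
  let m : Int := PySem.List.len (PySem.List.pyGetD matrix 0 [])
  let s :=
    (PySem.List.pyRange 0 n 1).foldl (fun s i =>
      (PySem.List.pyRange 0 m 1).foldl (fun s j =>
        if PySem.List.pyGetD (PySem.List.pyGetD matrix i []) j 0 > s.1 then
          (PySem.List.pyGetD (PySem.List.pyGetD matrix i []) j 0, i, j)
        else s) s)
      (PySem.List.pyGetD (PySem.List.pyGetD matrix 0 []) 0 0, (0 : Int), (0 : Int))
  let max_val := s.1
  let max_i := s.2.1
  let max_j := s.2.2
  let result := matrix.map (fun row => row)
  let result :=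
    if max_i ≠ 0 then
      let t := (PySem.List.pyGetD result max_i [], PySem.List.pyGetD result 0 [])
      PySem.List.pySetD (PySem.List.pySetD result 0 t.1) max_i t.2
    else result
  let result :=
    if max_j ≠ 0 then
      (PySem.List.pyRange 0 n 1).foldl (fun acc i =>
        let row := PySem.List.pyGetD acc i []
        let t := (PySem.List.pyGetD row max_j 0, PySem.List.pyGetD row 0 0)
        PySem.List.pySetD acc i (PySem.List.pySetD (PySem.List.pySetD row 0 t.1) max_j t.2))
        result
    else result
  (result, max_val)

-- ===== PORT B =====
-- Python tuple '>' on (Int, Int, Int), as B's max over (value, -i, -j) triples uses it.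
def pvLexGt (a b : Int × Int × Int) : Bool :=
  a.1 > b.1 || (a.1 == b.1 && (a.2.1 > b.2.1 || (a.2.1 == b.2.1 && a.2.2 > b.2.2)))

-- Python's max over a generator of triples: the first element starts the fold, later elements
-- replace it only when strictly greater in tuple order (empty generator raises; outside Pre_).
def pyMaxLex : List (Int × Int × Int) → Int × Int × Int
  | [] => ((0 : Int), (0 : Int), (0 : Int))
  | h :: t => t.foldl (fun b x => if pvLexGt x b then x else b) h

def move_max_to_corner_alt (matrix : List (List Int)) : List (List Int) × Int :=
  let n : Int := PySem.List.len matrix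
  let m : Int := PySem.List.len (PySem.List.pyGetD matrix 0 [])
  let trips : List (Int × Int × Int) :=
    (PySem.List.pyRange 0 n 1).flatMap (fun i =>
      (PySem.List.pyRange 0 m 1).map (fun j =>
        (PySem.List.pyGetD (PySem.List.pyGetD matrix i []) j 0, -i, -j)))
  let best := pyMaxLex trips
  let max_val := best.1
  let max_i := -best.2.1
  let max_j := -best.2.2
  let pr : Int → Int := fun i => if i == 0 then max_i else if i == max_i then 0 else i
  let pc : Int → Int := fun j => if j == 0 then max_j else if j == max_j then 0 else j
  let result := (PySem.List.pyRange 0 n 1).map (fun i =>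
    (PySem.List.pyRange 0 m 1).map (fun j =>
      PySem.List.pyGetD (PySem.List.pyGetD matrix (pr i) []) (pc j) 0))
  (result, max_val)

-- ===== PRECONDITION & SPEC =====
-- Pre_ excludes the empty matrix and matrices with an empty first row (both versions raise there) and
-- ragged matrices, on which A either raises IndexError or keeps the tail of rows longer than the first
-- beyond column len(matrix[0]) — an accident of its in-place swaps; B raises or truncates to the
-- rectangle it scanned.
def Pre_move_max_to_corner (matrix : List (List Int)) : Prop :=
  matrix ≠ [] ∧ matrix.headD [] ≠ [] ∧ ∀ row ∈ matrix, row.length = (matrix.headD []).length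
instance (matrix : List (List Int)) : Decidable (Pre_move_max_to_corner matrix) := by
  unfold Pre_move_max_to_corner; infer_instance
def pvWitness_move_max_to_corner : List (List Int) := [[1, 2], [3, 4]]
def Spec_move_max_to_corner (matrix : List (List Int)) (out : List (List Int) × Int) : Prop := out = move_max_to_corner_alt matrix
instance (matrix : List (List Int)) (out : List (List Int) × Int) : Decidable (Spec_move_max_to_corner matrix out) := by unfold Spec_move_max_to_corner; infer_instance

-- ===== CLAIM (what is proved, stated in full; the proofs are below) =====
def Claim_equal_move_max_to_corner : Prop := ∀ (matrix : List (List Int)), Dom_move_max_to_corner matrix → Pre_move_max_to_corner matrix → Spec_move_max_to_corner matrix (move_max_to_corner matrix)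

-- ===== LEMMAS AND PROOFS =====

-- A's scan, made structural: inner loop over one row, outer loop over the rows.
def pvRowGo (i : Int) : List Int → Int → Int × Int × Int → Int × Int × Int
  | [], _, s => s
  | x :: t, j, s => pvRowGo i t (j + 1) (if x > s.1 then (x, i, j) else s)

def pvOutGo : List (List Int) → Int → Int × Int × Int → Int × Int × Int
  | [], _, s => s
  | r :: rs, i, s => pvOutGo rs (i + 1) (pvRowGo i r 0 s)

-- the row-major list of (value, i, j) triples
def pvRowTrips (i : Int) : List Int → Int → List (Int × Int × Int)
  | [], _ => []
  | x :: t, j => (x, i, j) :: pvRowTrips i t (j + 1)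

def pvOutTrips : List (List Int) → Int → List (Int × Int × Int)
  | [], _ => []
  | r :: rs, c => pvRowTrips c r 0 ++ pvOutTrips rs (c + 1)

def pvValF (b x : Int × Int × Int) : Int × Int × Int := if x.1 > b.1 then x else b
def pvLexF (b x : Int × Int × Int) : Int × Int × Int := if pvLexGt x b then x else b
def pvNegT (x : Int × Int × Int) : Int × Int × Int := (x.1, -x.2.1, -x.2.2)
def pvPosLt (a b : Int × Int × Int) : Prop := a.2.1 < b.2.1 ∨ (a.2.1 = b.2.1 ∧ a.2.2 < b.2.2)

theorem pvRowGo_fold (i : Int) (r : List Int) (j : Int) (s : Int × Int × Int) :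
    pvRowGo i r j s = (pvRowTrips i r j).foldl pvValF s := by
  induction r generalizing j s with
  | nil => rfl
  | cons x t ih => simp only [pvRowGo, pvRowTrips, List.foldl_cons, pvValF, ih]

theorem pvOutGo_fold (rs : List (List Int)) (c : Int) (s : Int × Int × Int) :
    pvOutGo rs c s = (pvOutTrips rs c).foldl pvValF s := by
  induction rs generalizing c s with
  | nil => rfl
  | cons r t ih => simp only [pvOutGo, pvOutTrips, List.foldl_append, pvRowGo_fold, ih]

theorem pvRowTrips_mem (i : Int) (r : List Int) (c : Int) :
    ∀ x ∈ pvRowTrips i r c, x.2.1 = i ∧ c ≤ x.2.2 := by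
  induction r generalizing c with
  | nil => intro x hx; cases hx
  | cons y t ih =>
      intro x hx
      rcases List.mem_cons.mp hx with h | h
      · subst h; exact ⟨rfl, le_refl _⟩
      · obtain ⟨h1, h2⟩ := ih (c + 1) x h
        exact ⟨h1, by omega⟩

theorem pvOutTrips_mem (rs : List (List Int)) (c : Int) :
    ∀ x ∈ pvOutTrips rs c, c ≤ x.2.1 := by
  induction rs generalizing c with
  | nil => intro x hx; cases hx
  | cons r t ih =>
      intro x hx
      rcases List.mem_append.mp hx with h | h
      · exact le_of_eq (pvRowTrips_mem c r 0 x h).1.symm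
      · have := ih (c + 1) x h; omega

theorem pvRowTrips_pairwise (i : Int) (r : List Int) (c : Int) :
    (pvRowTrips i r c).Pairwise pvPosLt := by
  induction r generalizing c with
  | nil => exact List.Pairwise.nil
  | cons y t ih =>
      refine List.Pairwise.cons ?_ (ih (c + 1))
      intro x hx
      obtain ⟨h1, h2⟩ := pvRowTrips_mem i t (c + 1) x hx
      right
      exact ⟨h1.symm, by show c < x.2.2; omega⟩

theorem pvOutTrips_pairwise (rs : List (List Int)) (c : Int) :
    (pvOutTrips rs c).Pairwise pvPosLt := by
  induction rs generalizing c with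
  | nil => exact List.Pairwise.nil
  | cons r t ih =>
      rw [pvOutTrips, List.pairwise_append]
      refine ⟨pvRowTrips_pairwise c r 0, ih (c + 1), ?_⟩
      intro a ha b hb
      have h1 := (pvRowTrips_mem c r 0 a ha).1
      have h2 := pvOutTrips_mem t (c + 1) b hb
      left; omega

-- on a position-decreasing-from-the-seed list, Python's tuple max is the plain value max
theorem pvFoldNeg (l : List (Int × Int × Int)) (s : Int × Int × Int)
    (hs : ∀ x ∈ l, pvPosLt s x) (hp : l.Pairwise pvPosLt) :
    (l.map pvNegT).foldl pvLexF (pvNegT s) = pvNegT (l.foldl pvValF s) := by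
  induction l generalizing s with
  | nil => rfl
  | cons x t ih =>
      have hsx : pvPosLt s x := hs x (List.mem_cons_self)
      have hstep : pvLexF (pvNegT s) (pvNegT x) = pvNegT (pvValF s x) := by
        simp only [pvLexF, pvValF, pvLexGt, pvNegT]
        by_cases h : x.1 > s.1
        · simp [h]
        · rw [if_neg h]
          split_ifs with hcond
          · exfalso
            simp only [pvPosLt] at hsx
            simp only [Bool.or_eq_true, Bool.and_eq_true, decide_eq_true_eq, beq_iff_eq] at hcond
            rcases hcond with h1 | ⟨h1, h2⟩
            · omega
            · rcases h2 with h2 | ⟨h2, h3⟩ <;> rcases hsx with h' | ⟨h4, h5⟩ <;> omega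
          · rfl
      rw [List.map_cons, List.foldl_cons, List.foldl_cons, hstep]
      have hp' : t.Pairwise pvPosLt := (List.pairwise_cons.mp hp).2
      have hx' : ∀ y ∈ t, pvPosLt x y := (List.pairwise_cons.mp hp).1
      refine ih (pvValF s x) ?_ hp'
      intro y hy
      simp only [pvValF]
      by_cases h : x.1 > s.1
      · simp only [if_pos h]; exact hx' y hy
      · simp only [if_neg h]; exact hs y (List.mem_cons_of_mem _ hy)

-- the triple list, written over List.range (what both ports' pyRange folds unfold to)
theorem pvRowTrips_range (i : Int) (r : List Int) (c : Int) :
    pvRowTrips i r c = (List.range r.length).map (fun k => (r.getD k 0, i, c + (k : Int))) := by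
  induction r generalizing c with
  | nil => rfl
  | cons x t ih =>
      rw [pvRowTrips, ih (c + 1), List.length_cons, List.range_succ_eq_map, List.map_cons,
        List.map_map]
      refine congrArg₂ _ (by simp) (List.map_congr_left ?_)
      intro k _
      simp only [Function.comp_apply, List.getD_cons_succ]
      refine congrArg (fun z => (t.getD k 0, i, z)) ?_
      push_cast; ring

theorem pvOutTrips_range (rs : List (List Int)) (c : Int) :
    pvOutTrips rs c = (List.range rs.length).flatMap (fun (k : Nat) => pvRowTrips (c + (k : Int)) (rs.getD k []) 0) := by
  induction rs generalizing c with
  | nil => rfl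
  | cons r t ih =>
      rw [pvOutTrips, ih (c + 1), List.length_cons, List.range_succ_eq_map, List.flatMap_cons,
        List.flatMap_map]
      refine congrArg₂ _ (by simp) ?_
      refine congrArg (fun g => List.flatMap g (List.range t.length)) (funext fun k => ?_)
      simp only [List.getD_cons_succ]
      refine congrArg (fun z => pvRowTrips z (t.getD k []) 0) ?_
      push_cast; ring

-- A's state stays inside the rectangle
def pvInRange (N M : Int) (s : Int × Int × Int) : Prop :=
  0 ≤ s.2.1 ∧ s.2.1 < N ∧ 0 ≤ s.2.2 ∧ s.2.2 < M

theorem pvRowGo_bound (N M i : Int) (r : List Int) (j : Int) (s : Int × Int × Int)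
    (hi0 : 0 ≤ i) (hiN : i < N) (hj0 : 0 ≤ j) (hjM : j + r.length ≤ M)
    (hs : pvInRange N M s) : pvInRange N M (pvRowGo i r j s) := by
  induction r generalizing j s with
  | nil => exact hs
  | cons x t ih =>
      simp only [List.length_cons] at hjM
      refine ih (j + 1) _ (by omega) (by omega) ?_
      by_cases h : x > s.1
      · simp only [pvInRange, if_pos h]; refine ⟨hi0, hiN, hj0, by omega⟩
      · simpa [if_neg h] using hs

theorem pvOutGo_bound (N M : Int) (rs : List (List Int)) (c : Int) (s : Int × Int × Int)
    (hc : 0 ≤ c) (hcN : c + rs.length ≤ N) (hrow : ∀ r ∈ rs, (r.length : Int) ≤ M)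
    (hs : pvInRange N M s) : pvInRange N M (pvOutGo rs c s) := by
  induction rs generalizing c s with
  | nil => exact hs
  | cons r t ih =>
      simp only [List.length_cons] at hcN
      refine ih (c + 1) _ (by omega) (by omega) (fun r' hr' => hrow r' (by simp [hr'])) ?_
      refine pvRowGo_bound N M c r 0 s hc (by omega) le_rfl ?_ hs
      have := hrow r (by simp); omega

-- peel the indexed in-place column pass into a map (A's second loop)
theorem pvFold_set_map (f : List Int → List Int) :
    ∀ (xs : List (List Int)) (k : Nat), k ≤ xs.length →
    (List.range k).foldl (fun acc (j : Nat) => acc.set j (f (acc.getD j []))) xs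
      = (xs.take k).map f ++ xs.drop k := by
  intro xs k
  induction k with
  | zero => simp
  | succ k ih =>
      intro hk
      rw [List.range_succ, List.foldl_append, ih (by omega), List.foldl_cons, List.foldl_nil]
      have hklt : k < xs.length := by omega
      have hlen : ((xs.take k).map f).length = k := by
        simp [List.length_take, Nat.min_eq_left (le_of_lt hklt)]
      have hget : ((xs.take k).map f ++ xs.drop k).getD k [] = xs.getD k [] := by
        simp [List.getD, List.getElem?_append_right, List.getElem?_drop,
          Nat.min_eq_left (le_of_lt hklt)]
      rw [hget]
      have hdrop : xs.drop k = xs.getD k [] :: xs.drop (k + 1) := by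
        rw [List.getD_eq_getElem _ _ hklt]
        exact List.drop_eq_getElem_cons hklt
      rw [hdrop]
      rw [List.set_append_right _ _ (by omega)]
      simp only [hlen, Nat.sub_self, List.set_cons_zero]
      have htake : List.take (k + 1) (List.map f xs) = List.take k (List.map f xs) ++ [f xs[k]] := by
        rw [List.take_add_one, List.getElem?_eq_getElem (by simpa using hklt)]
        simp
      rw [List.map_take, List.map_take, htake, List.getD_eq_getElem _ _ hklt]
      simp

theorem pvFold_set_map_all (f : List Int → List Int) (xs : List (List Int)) :
    (List.range xs.length).foldl (fun acc (j : Nat) => acc.set j (f (acc.getD j []))) xs = xs.map f := by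
  rw [pvFold_set_map f xs xs.length le_rfl]
  simp

-- rebuilding a list from its indices, and a two-element swap as an index permutation
theorem pvSelf {α : Type} (d : α) (l : List α) :
    (List.range l.length).map (fun i => l.getD i d) = l := by
  refine List.ext_getElem (by simp) ?_
  intro i h1 h2
  rw [List.getElem_map, List.getElem_range, List.getD_eq_getElem _ _ h2]

theorem pvSwapPerm {α : Type} (d : α) (l : List α) (p : Nat) (hp : p < l.length) (hp0 : p ≠ 0) :
    (l.set 0 (l.getD p d)).set p (l.getD 0 d)
    = (List.range l.length).map (fun i => l.getD (if i = 0 then p else if i = p then 0 else i) d) := by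
  refine List.ext_getElem (by simp) ?_
  intro i h1 h2
  simp only [List.length_set] at h1
  simp only [List.getElem_map, List.getElem_range, List.getElem_set]
  by_cases hA : i = p
  · subst hA
    simp [hp0]
  · by_cases hB : i = 0
    · subst hB
      simp [hp0]
    · have hpi : ¬ p = i := fun h => hA h.symm
      rw [if_neg hpi, if_neg (Ne.symm hB), if_neg hB, if_neg hA]
      exact (List.getD_eq_getElem _ _ h1).symm

-- A's pyRange scan, as a fold of the plain value max over the triple list
theorem pvScanA_eq (mat : List (List Int))
    (hlen : ∀ row ∈ mat, row.length = (mat.getD 0 []).length) (s₀ : Int × Int × Int) :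
    (PySem.List.pyRange 0 (PySem.List.len mat) 1).foldl (fun s i =>
      (PySem.List.pyRange 0 (PySem.List.len (PySem.List.pyGetD mat 0 [])) 1).foldl (fun s j =>
        if PySem.List.pyGetD (PySem.List.pyGetD mat i []) j 0 > s.1 then
          (PySem.List.pyGetD (PySem.List.pyGetD mat i []) j 0, i, j)
        else s) s) s₀
    = (pvOutTrips mat 0).foldl pvValF s₀ := by
  rw [pvOutTrips_range, List.foldl_flatMap]
  simp only [PySem.List.len_eq, PySem.List.pyGetD_zero, PySem.List.pyRange_zero_nat,
    List.foldl_map]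
  refine PySem.List.foldl_congr_mem _ _ _ _ ?_
  intro acc k hk
  have hk' : k < mat.length := List.mem_range.mp hk
  have hrowmem : mat.getD k [] ∈ mat := by
    rw [List.getD_eq_getElem _ _ hk']; exact List.getElem_mem _
  rw [← hlen _ hrowmem, pvRowTrips_range, List.foldl_map]
  refine PySem.List.foldl_congr_mem _ _ _ _ ?_
  intro acc' j _
  simp [pvValF, PySem.List.pyGetD_natCast]


-- B's pyRange triple generator is the same triple list, negated
theorem pvTripsB_eq (mat : List (List Int))
    (hlen : ∀ row ∈ mat, row.length = (mat.getD 0 []).length) :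
    (PySem.List.pyRange 0 (PySem.List.len mat) 1).flatMap (fun i =>
      (PySem.List.pyRange 0 (PySem.List.len (PySem.List.pyGetD mat 0 [])) 1).map (fun j =>
        (PySem.List.pyGetD (PySem.List.pyGetD mat i []) j 0, -i, -j)))
    = (pvOutTrips mat 0).map pvNegT := by
  rw [pvOutTrips_range, List.map_flatMap]
  simp only [PySem.List.len_eq, PySem.List.pyGetD_zero, PySem.List.pyRange_zero_nat]
  rw [List.flatMap_map, List.flatMap_def, List.flatMap_def]
  refine congrArg _ (List.map_congr_left ?_)
  intro k hk
  have hk' : k < mat.length := List.mem_range.mp hk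
  have hrowmem : mat.getD k [] ∈ mat := by
    rw [List.getD_eq_getElem _ _ hk']; exact List.getElem_mem _
  rw [← hlen _ hrowmem, pvRowTrips_range, List.map_map, List.map_map]
  refine List.map_congr_left ?_
  intro j _
  simp [pvNegT, PySem.List.pyGetD_natCast]

-- B's Int-valued index permutation is the Nat one, under the casts
theorem pvPermCast (p k : Nat) :
    (if ((k : Int) == 0) = true then ((p : Nat) : Int)
     else if ((k : Int) == ((p : Nat) : Int)) = true then 0 else (k : Int))
    = (((if k = 0 then p else if k = p then 0 else k) : Nat) : Int) := by
  by_cases h0 : k = 0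
  · simp [h0]
  · by_cases hp : k = p
    · simp [hp]
    · simp [hp]

theorem pvSetD_zero {α : Type} (xs : List α) (v : α) :
    PySem.List.pySetD xs 0 v = xs.set 0 v := by
  rw [show (0 : Int) = ((0 : Nat) : Int) from rfl, PySem.List.pySetD_natCast]

theorem pvFold_set_map_all' (f : List Int → List Int) (xs : List (List Int)) (n : Nat)
    (h : xs.length = n) :
    (List.range n).foldl (fun acc (j : Nat) => acc.set j (f (acc.getD j []))) xs = xs.map f := by
  subst h
  exact pvFold_set_map_all f xs

-- A's copy-and-swap result equals the permutation rebuild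
theorem pvResEq (mat : List (List Int)) (iN jN : Nat)
    (hlen : ∀ row ∈ mat, row.length = (mat.getD 0 []).length)
    (hi : iN < mat.length) (hj : jN < (mat.getD 0 []).length) :
    (if jN ≠ 0 then
       (List.range mat.length).foldl (fun acc k =>
         acc.set k (((acc.getD k []).set 0 ((acc.getD k []).getD jN 0)).set jN ((acc.getD k []).getD 0 0)))
         (if iN ≠ 0 then (mat.set 0 (mat.getD iN [])).set iN (mat.getD 0 []) else mat)
     else if iN ≠ 0 then (mat.set 0 (mat.getD iN [])).set iN (mat.getD 0 []) else mat)
    = (List.range mat.length).map (fun i =>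
        (List.range (mat.getD 0 []).length).map (fun j =>
          (mat.getD (if i = 0 then iN else if i = iN then 0 else i) []).getD
            (if j = 0 then jN else if j = jN then 0 else j) 0)) := by
  have hmid : (if iN ≠ 0 then (mat.set 0 (mat.getD iN [])).set iN (mat.getD 0 []) else mat)
      = (List.range mat.length).map (fun i => mat.getD (if i = 0 then iN else if i = iN then 0 else i) []) := by
    by_cases hi0 : iN = 0
    · subst hi0
      rw [if_neg (by simp)]
      have h1 : (List.range mat.length).map (fun i => mat.getD (if i = 0 then 0 else if i = 0 then 0 else i) [])
          = (List.range mat.length).map (fun i => mat.getD i []) :=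
        List.map_congr_left (fun i _ => by by_cases h : i = 0 <;> simp [h])
      rw [h1, pvSelf]
    · rw [if_pos hi0, pvSwapPerm [] mat iN hi hi0]
  have hrowmem : ∀ i, i < mat.length →
      mat.getD (if i = 0 then iN else if i = iN then 0 else i) [] ∈ mat := by
    intro i hilt
    have hpi : (if i = 0 then iN else if i = iN then 0 else i) < mat.length := by
      split_ifs <;> omega
    rw [List.getD_eq_getElem _ _ hpi]
    exact List.getElem_mem _
  rw [hmid]
  by_cases hj0 : jN = 0
  · subst hj0
    rw [if_neg (by simp)]
    refine List.map_congr_left ?_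
    intro i hi'
    have hrl := hlen _ (hrowmem i (List.mem_range.mp hi'))
    have h1 : (List.range (mat.getD 0 []).length).map (fun j =>
          (mat.getD (if i = 0 then iN else if i = iN then 0 else i) []).getD
            (if j = 0 then 0 else if j = 0 then 0 else j) 0)
        = (List.range (mat.getD 0 []).length).map (fun j =>
          (mat.getD (if i = 0 then iN else if i = iN then 0 else i) []).getD j 0) :=
      List.map_congr_left (fun j _ => by by_cases h : j = 0 <;> simp [h])
    rw [h1, ← hrl, pvSelf]
  · rw [if_pos hj0]
    rw [pvFold_set_map_all' (fun row => (row.set 0 (row.getD jN 0)).set jN (row.getD 0 0)) _ _ (by simp),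
      List.map_map]
    refine List.map_congr_left ?_
    intro i hi'
    have hrl := hlen _ (hrowmem i (List.mem_range.mp hi'))
    simp only [Function.comp_apply]
    rw [pvSwapPerm 0 (mat.getD (if i = 0 then iN else if i = iN then 0 else i) []) jN
      (by rw [hrl]; exact hj) hj0, hrl]

-- main equivalence
theorem pvMain (matrix : List (List Int)) (hpre : Pre_move_max_to_corner matrix) :
    move_max_to_corner matrix = move_max_to_corner_alt matrix := by
  obtain ⟨hm, h0, hlenH⟩ := hpre
  have hhead : matrix.headD [] = matrix.getD 0 [] := by cases matrix <;> simp
  rw [hhead] at h0 hlenH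
  obtain ⟨r0, rs, rfl⟩ : ∃ r0 rs, matrix = r0 :: rs := by
    cases matrix with
    | nil => exact absurd rfl hm
    | cons a l => exact ⟨a, l, rfl⟩
  obtain ⟨a, t0, rfl⟩ : ∃ a t0, r0 = a :: t0 := by
    cases r0 with
    | nil => simp at h0
    | cons a l => exact ⟨a, l, rfl⟩
  have hm0 : ((a :: t0) :: rs).getD 0 [] = a :: t0 := rfl
  have hlen : ∀ row ∈ (a :: t0) :: rs, row.length = (a :: t0).length := by
    intro row hr; simpa [hm0] using hlenH row hr
  have hlen' : ∀ row ∈ (a :: t0) :: rs, row.length = (((a :: t0) :: rs).getD 0 []).length := hlen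
  -- the scan value
  set σ : Int × Int × Int :=
    (pvOutTrips ((a :: t0) :: rs) 0).foldl pvValF (a, (0 : Int), (0 : Int)) with hσ
  have hPcons : pvOutTrips ((a :: t0) :: rs) 0
      = (a, 0, 0) :: (pvRowTrips 0 t0 1 ++ pvOutTrips rs 1) := rfl
  have hσtail : σ = (pvRowTrips 0 t0 1 ++ pvOutTrips rs 1).foldl pvValF (a, (0 : Int), (0 : Int)) := by
    rw [hσ, hPcons, List.foldl_cons]
    simp [pvValF]
  -- bounds on the scan state
  have hσrange : pvInRange ((((a :: t0) :: rs).length : Int)) (((a :: t0).length : Int)) σ := by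
    have hb := pvOutGo_bound ((((a :: t0) :: rs).length : Int)) (((a :: t0).length : Int))
      ((a :: t0) :: rs) 0 (a, 0, 0) le_rfl (by simp)
      (fun r hr => by rw [hlen r hr])
      (by exact ⟨le_rfl,
        by show (0 : Int) < (((a :: t0) :: rs).length : Int); exact_mod_cast Nat.succ_pos rs.length,
        le_rfl,
        by show (0 : Int) < ((a :: t0).length : Int); exact_mod_cast Nat.succ_pos t0.length⟩)
    rwa [pvOutGo_fold] at hb
  obtain ⟨hσ1, hσ2, hσ3, hσ4⟩ := hσrange
  set iN : Nat := σ.2.1.toNat with hiN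
  set jN : Nat := σ.2.2.toNat with hjN
  have hiC : (iN : Int) = σ.2.1 := Int.toNat_of_nonneg hσ1
  have hjC : (jN : Int) = σ.2.2 := Int.toNat_of_nonneg hσ3
  have hiLt : iN < ((a :: t0) :: rs).length := by omega
  have hjLt : jN < (a :: t0).length := by omega
  -- B's tuple max is the negated scan value
  have hpairP := pvOutTrips_pairwise ((a :: t0) :: rs) 0
  rw [hPcons, List.pairwise_cons] at hpairP
  have hBmax : ((pvRowTrips 0 t0 1 ++ pvOutTrips rs 1).map pvNegT).foldl
      (fun b x => if pvLexGt x b then x else b) (a, (0 : Int), (0 : Int)) = pvNegT σ := by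
    have hfn := pvFoldNeg (pvRowTrips 0 t0 1 ++ pvOutTrips rs 1) (a, 0, 0) hpairP.1 hpairP.2
    have hz : pvNegT (a, (0 : Int), (0 : Int)) = (a, (0 : Int), (0 : Int)) := by
      simp [pvNegT]
    rw [hz] at hfn
    rw [hσtail]
    exact hfn
  -- unfold both ports and rewrite the scans
  simp only [move_max_to_corner, move_max_to_corner_alt, List.map_id']
  rw [pvScanA_eq _ hlen', pvTripsB_eq _ hlen']
  have hseed : PySem.List.pyGetD (PySem.List.pyGetD ((a :: t0) :: rs) 0 []) 0 0 = a := by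
    simp [PySem.List.pyGetD_zero]
  rw [hseed, ← hσ]
  have hz : pvNegT (a, (0 : Int), (0 : Int)) = (a, (0 : Int), (0 : Int)) := by simp [pvNegT]
  have hmax : pyMaxLex ((pvOutTrips ((a :: t0) :: rs) 0).map pvNegT) = pvNegT σ := by
    rw [hPcons, List.map_cons, hz]
    simp only [pyMaxLex]
    exact hBmax
  rw [hmax]
  simp only [pvNegT, neg_neg]
  rw [← hiC, ← hjC]
  refine congrArg₂ Prod.mk ?_ rfl
  simp only [PySem.List.len_eq, PySem.List.pyGetD_zero, PySem.List.pyRange_zero_nat,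
    List.foldl_map, List.map_map, Function.comp_def, pvPermCast, PySem.List.pyGetD_natCast,
    PySem.List.pySetD_natCast, pvSetD_zero, ne_eq, Int.natCast_eq_zero]
  exact pvResEq ((a :: t0) :: rs) iN jN hlen' hiLt hjLt

-- ===== VERDICT (by name: the statement is the Claim_ definition above) =====
theorem move_max_to_corner_spec : Claim_equal_move_max_to_corner := by
  intro matrix _ hpre
  unfold Spec_move_max_to_corner
  exact pvMain matrix hpre
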